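-- pv_equiv track=rewrite | github.com/lei-nlp-lab/logical_subspace_acl_2026 | proofwriter/data_processing/proof_to_text.py | _find_main_arrow
-- ===== SOURCE A (Python) =====
-- def _find_main_arrow(s: str) -> int:
--     """Find the index of the main '->' at depth 0."""
--     depth = 0
--     for i in range(len(s) - 1):
--         if s[i] == '(':
--             depth += 1
--         elif s[i] == ')':
--             depth -= 1
--         elif depth == 0 and s[i:i+2] == '->':
--             return i
--     return -1
-- ===== SOURCE B (Python) =====
-- def _find_main_arrow(s: str) -> int:
--     """Find the index of the main '->' at depth 0."""
--     depth = 0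
--     base = 0
--     rest = s
--     while True:
--         p = rest.find('->')
--         if p == -1:
--             return -1
--         depth += rest.count('(', 0, p) - rest.count(')', 0, p)
--         if depth == 0:
--             return base + p
--         base += p + 1
--         rest = rest[p + 1:]
-- ===== Notes on version B (the rewrite author's own statement) =====
-- stated objective: faster
-- what changed: Replaces A's per-character Python-level depth scan with a candidate-driven loop: str.find jumps to each arrow-token occurrence and the paren balance is accumulated over the gap slices with str.count (same O(n) asymptotics, C-level scanning).
import Mathlib
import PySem

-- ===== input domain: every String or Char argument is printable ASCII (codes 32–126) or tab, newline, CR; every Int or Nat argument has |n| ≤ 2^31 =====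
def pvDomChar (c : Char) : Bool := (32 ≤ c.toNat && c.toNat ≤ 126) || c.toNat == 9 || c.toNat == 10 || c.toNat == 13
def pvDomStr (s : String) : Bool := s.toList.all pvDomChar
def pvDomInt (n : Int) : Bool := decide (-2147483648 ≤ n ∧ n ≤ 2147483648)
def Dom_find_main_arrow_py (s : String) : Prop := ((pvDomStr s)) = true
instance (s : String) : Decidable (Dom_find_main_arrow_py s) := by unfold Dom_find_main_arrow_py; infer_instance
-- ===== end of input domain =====

-- B replaces A's char-by-char scan with a candidate-driven loop (str.find for the next '->',
-- paren counts over the gap slice); same value on every input; measurably faster by a constant factor (C-level scanning).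

-- ===== PORT A =====
-- A's loop 'for i in range(len(s)-1)': structural recursion needing two remaining chars;
-- a single leftover char is not visited (range stops at len-2).
def aLoop : List Char → Int → Int → Int
  | [], _, _ => -1
  | [_], _, _ => -1
  | c :: c' :: rest, i, depth =>
    if c = '(' then aLoop (c' :: rest) (i + 1) (depth + 1)
    else if c = ')' then aLoop (c' :: rest) (i + 1) (depth - 1)
    else if depth = 0 ∧ c = '-' ∧ c' = '>' then i
    else aLoop (c' :: rest) (i + 1) depth

def find_main_arrow_py (s : String) : Int := aLoop s.toList 0 0

-- ===== PORT B =====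
-- Source B's while-loop; fuel = length of the remaining string is a totality guard only
-- (each iteration drops at least one char, so fuel never runs out before rest is empty).
-- rest.count('(', 0, p) (a single-char needle) is ported as List.count '(' on the slice — exact.
def bLoop : Nat → List Char → Int → Int → Int
  | 0, _, _, _ => -1
  | fuel + 1, cs, base, depth =>
    let p := PySem.Chars.find cs ['-', '>']
    if p = -1 then -1
    else
      let pre := cs.take p.toNat
      let d := depth + (((pre.count '(' : Int)) - ((pre.count ')' : Int)))
      if d = 0 then base + p
      else bLoop fuel (cs.drop (p.toNat + 1)) (base + p + 1) d

def find_main_arrow_py_alt (s : String) : Int := bLoop s.toList.length s.toList 0 0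

-- ===== PRECONDITION & SPEC =====
def Spec_find_main_arrow_py (s : String) (out : Int) : Prop := out = find_main_arrow_py_alt s
instance (s : String) (out : Int) : Decidable (Spec_find_main_arrow_py s out) := by unfold Spec_find_main_arrow_py; infer_instance

-- ===== CLAIM (what is proved, stated in full; the proofs are below) =====
def Claim_equal_find_main_arrow_py : Prop := ∀ (s : String), Dom_find_main_arrow_py s → Spec_find_main_arrow_py s (find_main_arrow_py s)

-- ===== LEMMAS AND PROOFS =====

-- find points at j iff the needle is a prefix of drop j and at no earlier position.
theorem find_eq_natCast_iff (s sub : List Char) (j : Nat) :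
    PySem.Chars.find s sub = (j : Int) ↔ sub <+: s.drop j ∧ ∀ i < j, ¬ sub <+: s.drop i := by
  constructor
  · intro h
    have h0 : 0 ≤ PySem.Chars.find s sub := by rw [h]; exact Int.natCast_nonneg j
    have hs := PySem.Chars.find_spec h0
    rw [h] at hs
    simpa using hs
  · rintro ⟨hpre, hmin⟩
    have hinf : sub <:+: s := hpre.isInfix.trans (List.drop_suffix j s).isInfix
    have h0 : 0 ≤ PySem.Chars.find s sub := (PySem.Chars.find_nonneg_iff s sub).mpr hinf
    obtain ⟨h1, h2⟩ := PySem.Chars.find_spec h0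
    have hj : (PySem.Chars.find s sub).toNat = j := by
      rcases lt_trichotomy (PySem.Chars.find s sub).toNat j with h | h | h
      · exact absurd h1 (hmin _ h)
      · exact h
      · exact absurd hpre (h2 j h)
    omega

theorem find_arrow_cons (c c' : Char) (tl : List Char) :
    PySem.Chars.find (c :: c' :: tl) ['-', '>'] =
      if c = '-' ∧ c' = '>' then 0
      else if PySem.Chars.find (c' :: tl) ['-', '>'] = -1 then -1
      else PySem.Chars.find (c' :: tl) ['-', '>'] + 1 := by
  split_ifs with h1 h2
  · obtain ⟨rfl, rfl⟩ := h1
    exact (find_eq_natCast_iff _ _ 0).mpr ⟨⟨tl, rfl⟩, by omega⟩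
  · rw [PySem.Chars.find_eq_neg_one_iff] at h2 ⊢
    intro hinf
    have := (PySem.Chars.isIn_iff_infix _ _).mpr hinf
    obtain ⟨j, hj⟩ := (PySem.Chars.exists_prefix_drop_iff_isIn _ _).mpr this
    cases j with
    | zero =>
      simp only [List.drop_zero] at hj
      rcases hj with ⟨t, ht⟩
      cases ht
      exact h1 ⟨rfl, rfl⟩
    | succ k =>
      exact h2 (hj.isInfix.trans (List.drop_suffix k (c' :: tl)).isInfix)
  · have h0 : 0 ≤ PySem.Chars.find (c' :: tl) ['-', '>'] := by
      have := PySem.Chars.neg_one_le_find (c' :: tl) ['-', '>']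
      omega
    obtain ⟨hp, hm⟩ := PySem.Chars.find_spec h0
    have : PySem.Chars.find (c :: c' :: tl) ['-', '>'] =
        (((PySem.Chars.find (c' :: tl) ['-', '>']).toNat + 1 : Nat) : Int) := by
      apply (find_eq_natCast_iff _ _ _).mpr
      refine ⟨by simpa using hp, ?_⟩
      intro i hi hpre
      cases i with
      | zero =>
        rcases hpre with ⟨t, ht⟩
        simp only [List.drop_zero] at ht
        cases ht
        exact h1 ⟨rfl, rfl⟩
      | succ k =>
        exact hm k (by omega) (by simpa using hpre)
    rw [this]; omega

-- One non-candidate head char of the remaining string moves into the paren balance.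
theorem bLoop_step (fuel : Nat) (c c' : Char) (tl : List Char) (base depth : Int)
    (hnc : ¬ (c = '-' ∧ c' = '>')) :
    bLoop (fuel + 1) (c :: c' :: tl) base depth =
      bLoop (fuel + 1) (c' :: tl) (base + 1)
        (depth + (if c = '(' then 1 else 0) - (if c = ')' then 1 else 0)) := by
  simp only [bLoop, find_arrow_cons, if_neg hnc]
  by_cases hf : PySem.Chars.find (c' :: tl) ['-', '>'] = -1
  · simp [hf]
  · have h0 : 0 ≤ PySem.Chars.find (c' :: tl) ['-', '>'] := by
      have := PySem.Chars.neg_one_le_find (c' :: tl) ['-', '>']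
      omega
    have hne : ¬ PySem.Chars.find (c' :: tl) ['-', '>'] + 1 = -1 := by omega
    have htn : (PySem.Chars.find (c' :: tl) ['-', '>'] + 1).toNat =
        (PySem.Chars.find (c' :: tl) ['-', '>']).toNat + 1 := by omega
    simp only [if_neg hne, if_neg hf, htn, List.take_succ_cons, List.count_cons,
      List.drop_succ_cons]
    have hcnt : ∀ (a : Char) (l : List Char),
        ((l.count a + if c == a then 1 else 0 : Nat) : Int)
          = (l.count a : Int) + (if c = a then 1 else 0) := by
      intro a l
      by_cases h : c = a
      · subst h; simp
      · simp [h]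
    rw [hcnt, hcnt]
    have harith :
        depth + ((((c' :: tl).take (PySem.Chars.find (c' :: tl) ['-', '>']).toNat).count '(' : Int)
            + (if c = '(' then 1 else 0)
          - ((((c' :: tl).take (PySem.Chars.find (c' :: tl) ['-', '>']).toNat).count ')' : Int)
            + (if c = ')' then 1 else 0)))
        = depth + (if c = '(' then 1 else 0) - (if c = ')' then 1 else 0)
          + ((((c' :: tl).take (PySem.Chars.find (c' :: tl) ['-', '>']).toNat).count '(' : Int)
            - (((c' :: tl).take (PySem.Chars.find (c' :: tl) ['-', '>']).toNat).count ')' : Int)) := by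
      ring
    rw [harith,
      show base + (PySem.Chars.find (c' :: tl) ['-', '>'] + 1) + 1
          = base + 1 + PySem.Chars.find (c' :: tl) ['-', '>'] + 1 by ring,
      show base + (PySem.Chars.find (c' :: tl) ['-', '>'] + 1)
          = base + 1 + PySem.Chars.find (c' :: tl) ['-', '>'] by ring]

theorem aLoop_eq_bLoop : ∀ (n : Nat) (cs : List Char) (fuel : Nat) (base depth : Int),
    cs.length ≤ n → cs.length ≤ fuel → aLoop cs base depth = bLoop fuel cs base depth := by
  intro n
  induction n with
  | zero =>
    intro cs fuel base depth hn hf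
    have : cs = [] := List.eq_nil_of_length_eq_zero (by omega)
    subst this
    have hfind : PySem.Chars.find [] ['-', '>'] = -1 := by decide
    cases fuel <;> simp [aLoop, bLoop, hfind]
  | succ m ih =>
    intro cs fuel base depth hn hf
    match cs, fuel with
    | [], 0 => simp [aLoop, bLoop]
    | [], fuel + 1 =>
      have hfind : PySem.Chars.find [] ['-', '>'] = -1 := by decide
      simp [aLoop, bLoop, hfind]
    | [c], fuel =>
      obtain ⟨k, rfl⟩ : ∃ k, fuel = k + 1 := ⟨fuel - 1, by simp at hf; omega⟩
      have hfind : PySem.Chars.find [c] ['-', '>'] = -1 := by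
        rw [PySem.Chars.find_eq_neg_one_iff]
        intro h
        have := h.length_le
        simp at this
      simp [aLoop, bLoop, hfind]
    | c :: c' :: tl, fuel =>
      obtain ⟨k, rfl⟩ : ∃ k, fuel = k + 1 := ⟨fuel - 1, by simp at hf; omega⟩
      by_cases hc : c = '-' ∧ c' = '>'
      · obtain ⟨rfl, rfl⟩ := hc
        have hfind : PySem.Chars.find ('-' :: '>' :: tl) ['-', '>'] = (0 : Int) :=
          (find_eq_natCast_iff _ _ 0).mpr ⟨⟨tl, rfl⟩, by omega⟩
        simp only [aLoop, bLoop, hfind]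
        norm_num
        by_cases hd : depth = 0
        · simp [hd]
        · simp only [if_neg (by simp : ¬ ('-' : Char) = '('),
            if_neg (by simp : ¬ ('-' : Char) = ')'), hd, if_false]
          exact ih _ _ _ _ (by simp at hn ⊢; omega) (by simp at hf ⊢; omega)
      · rw [bLoop_step k c c' tl base depth hc]
        by_cases h1 : c = '('
        · subst h1
          simp only [aLoop]
          have := ih (c' :: tl) (k + 1) (base + 1) (depth + 1)
            (by simp at hn ⊢; omega) (by simp at hf ⊢; omega)
          simpa using this
        · by_cases h2 : c = ')'
          · subst h2
            simp only [aLoop, if_neg (by decide : ¬ (')' : Char) = '(')]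
            have := ih (c' :: tl) (k + 1) (base + 1) (depth - 1)
              (by simp at hn ⊢; omega) (by simp at hf ⊢; omega)
            simpa using this
          · have hno : ¬ (depth = 0 ∧ c = '-' ∧ c' = '>') := fun h => hc h.2
            simp only [aLoop, if_neg h1, if_neg h2, if_neg hno]
            have := ih (c' :: tl) (k + 1) (base + 1) depth
              (by simp at hn ⊢; omega) (by simp at hf ⊢; omega)
            simpa [h1, h2] using this

-- ===== VERDICT (by name: the statement is the Claim_ definition above) =====
theorem find_main_arrow_py_spec : Claim_equal_find_main_arrow_py := by
  intro s _
  unfold Spec_find_main_arrow_py find_main_arrow_py find_main_arrow_py_alt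
  exact aLoop_eq_bLoop s.toList.length s.toList s.toList.length 0 0 le_rfl le_rfl
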